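-- pv_equiv track=rewrite | github.com/XiaoMi/kaldi-onnx | converter/component.py | read_next_token
-- ===== SOURCE A (Python) =====
-- from typing import Dict, Optional, Set, TextIO, Tuple
--
-- def read_next_token(line: str, pos: int) -> Tuple[Optional[str], int]:
--   """Read next token from line.
--
--   Args:
--     line: line.
--     pos: current position.
--
--   Returns:
--     Token (None if not found) and current position.
--   """
--   assert isinstance(line, str) and isinstance(pos, int)
--   assert pos >= 0
--
--   while pos < len(line) and line[pos].isspace():
--     pos += 1
--
--   if pos >= len(line):
--     return None, pos
--
--   initial_pos = pos
--   while pos < len(line) and not line[pos].isspace():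
--     pos += 1
--   return line[initial_pos:pos], pos
-- ===== SOURCE B (Python) =====
-- def read_next_token(line, pos):
--   """Read next token from line (idiomatic: slicing + lstrip + split)."""
--   assert isinstance(line, str) and isinstance(pos, int)
--   assert pos >= 0
--   rest = line[pos:]
--   stripped = rest.lstrip()
--   start = pos + (len(rest) - len(stripped))
--   if not stripped:
--     return None, start
--   token = stripped.split(None, 1)[0]
--   return token, start + len(token)
-- ===== Notes on version B (the rewrite author's own statement) =====
-- stated objective: idiomatic
-- what changed: Replaces the two hand-written per-character while loops with string built-ins: slice off the prefix, lstrip to skip leading whitespace, split(None, 1) to take the first token.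
import Mathlib
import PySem

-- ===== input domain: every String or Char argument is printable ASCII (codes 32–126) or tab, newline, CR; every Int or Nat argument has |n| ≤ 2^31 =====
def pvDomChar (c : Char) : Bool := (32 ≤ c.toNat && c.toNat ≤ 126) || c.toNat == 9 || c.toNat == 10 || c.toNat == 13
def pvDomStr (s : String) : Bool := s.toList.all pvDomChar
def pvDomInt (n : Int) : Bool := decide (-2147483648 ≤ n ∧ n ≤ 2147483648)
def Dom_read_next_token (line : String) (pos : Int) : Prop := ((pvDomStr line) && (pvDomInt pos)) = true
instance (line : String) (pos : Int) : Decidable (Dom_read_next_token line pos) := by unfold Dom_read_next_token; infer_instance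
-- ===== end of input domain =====

-- B replaces A's two hand-written character-scanning while loops with string built-ins
-- (slice + lstrip + split(None, 1)); idiomatic, same cost, return value proved equal on Pre_.

-- ===== PORT A =====
-- 'while pos < len(line) and line[pos].isspace(): pos += 1'
def rntA_skip (cs : List Char) (p : Nat) : Nat :=
  if h : p < cs.length then
    if PySem.Chars.isspace cs[p] then rntA_skip cs (p + 1) else p
  else p
termination_by cs.length - p

-- 'while pos < len(line) and not line[pos].isspace(): pos += 1'
def rntA_scan (cs : List Char) (p : Nat) : Nat :=
  if h : p < cs.length then
    if !PySem.Chars.isspace cs[p] then rntA_scan cs (p + 1) else p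
  else p
termination_by cs.length - p

def read_next_token (line : String) (pos : Int) : Option String × Int :=
  let cs := line.toList
  let p := rntA_skip cs pos.toNat      -- pos ≥ 0 by the assert (Pre_), so toNat is exact
  if cs.length ≤ p then (none, (p : Int))
  else
    let q := rntA_scan cs p
    (some (String.ofList (PySem.List.slice cs (some (p : Int)) (some (q : Int)))), (q : Int))

-- ===== PORT B =====
def read_next_token_alt (line : String) (pos : Int) : Option String × Int :=
  let rest := PySem.List.slice line.toList (some pos) none   -- line[pos:]
  let stripped := PySem.Chars.lstrip rest                    -- rest.lstrip()
  let start := pos + ((rest.length : Int) - (stripped.length : Int))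
  if stripped.isEmpty then (none, start)
  else
    -- stripped.split(None, 1)[0]; the list is nonempty here, so [0] is its head
    let token := (PySem.Chars.split₀Max stripped 1).headD []
    (some (String.ofList token), start + (token.length : Int))

-- ===== PRECONDITION & SPEC =====
-- A asserts pos >= 0; on negative pos it raises AssertionError, so Pre_ excludes exactly those inputs.
def Pre_read_next_token (line : String) (pos : Int) : Prop := 0 ≤ pos
instance (line : String) (pos : Int) : Decidable (Pre_read_next_token line pos) := by unfold Pre_read_next_token; infer_instance
def pvWitness_read_next_token : String × Int := ("  ab c", 1)

def Spec_read_next_token (line : String) (pos : Int) (out : Option String × Int) : Prop := out = read_next_token_alt line pos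
instance (line : String) (pos : Int) (out : Option String × Int) : Decidable (Spec_read_next_token line pos out) := by unfold Spec_read_next_token; infer_instance

-- ===== CLAIM (what is proved, stated in full; the proofs are below) =====
def Claim_equal_read_next_token : Prop := ∀ (line : String) (pos : Int), Dom_read_next_token line pos → Pre_read_next_token line pos → Spec_read_next_token line pos (read_next_token line pos)

-- ===== LEMMAS AND PROOFS =====

lemma rntA_skip_eq (cs : List Char) (p : Nat) :
    rntA_skip cs p = p + ((cs.drop p).takeWhile PySem.Chars.isspace).length := by
  fun_induction rntA_skip cs p with
  | case1 p h hsp ih =>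
      rw [List.drop_eq_getElem_cons h]
      simp only [List.takeWhile_cons, hsp, if_true, List.length_cons]
      omega
  | case2 p h hsp =>
      rw [List.drop_eq_getElem_cons h]
      simp [hsp]
  | case3 p h =>
      rw [List.drop_eq_nil_of_le (by omega)]
      simp

lemma rntA_scan_eq (cs : List Char) (p : Nat) :
    rntA_scan cs p = p + ((cs.drop p).takeWhile (fun c => !PySem.Chars.isspace c)).length := by
  fun_induction rntA_scan cs p with
  | case1 p h hsp ih =>
      rw [List.drop_eq_getElem_cons h]
      simp only [List.takeWhile_cons, hsp, if_true, List.length_cons]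
      omega
  | case2 p h hsp =>
      rw [List.drop_eq_getElem_cons h]
      simp at hsp
      simp [hsp]
  | case3 p h =>
      rw [List.drop_eq_nil_of_le (by omega)]
      simp

-- l.take (l.takeWhile q).length is the takeWhile prefix itself
lemma take_length_takeWhile' (q : Char → Bool) (l : List Char) :
    l.take (l.takeWhile q).length = l.takeWhile q := by
  induction l with
  | nil => simp
  | cons a t ih => by_cases h : q a <;> simp [h, ih]

-- l.drop (l.takeWhile q).length is the dropWhile suffix
lemma drop_length_takeWhile' (q : Char → Bool) (l : List Char) :
    l.drop (l.takeWhile q).length = l.dropWhile q := by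
  induction l with
  | nil => simp
  | cons a t ih => by_cases h : q a <;> simp [h, ih]

-- head of s.split(None, 1) for nonempty s with no leading whitespace is the first word
lemma split₀Max_one_head (cs : List Char) (hne : cs ≠ [])
    (hfix : cs.dropWhile PySem.Chars.isspace = cs) :
    (PySem.Chars.split₀Max cs 1).headD [] = cs.takeWhile (fun c => !PySem.Chars.isspace c) := by
  obtain ⟨a, t, rfl⟩ := List.exists_cons_of_ne_nil hne
  simp only [PySem.Chars.split₀Max]
  norm_num
  rw [PySem.Chars.split₀Max.go.eq_def]
  simp only [hfix]
  norm_num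
  rw [PySem.Chars.split₀Max.go.eq_def]
  split
  · simp
  · split
    · simp
    · simp

-- ===== VERDICT (by name: the statement is the Claim_ definition above) =====
theorem read_next_token_spec : Claim_equal_read_next_token := by
  intro line pos hdom hpre
  unfold Spec_read_next_token
  unfold Pre_read_next_token at hpre
  simp only [read_next_token, read_next_token_alt]
  rw [PySem.List.slice_from _ hpre]
  set cs := line.toList with hcs
  set pn := pos.toNat with hpn
  have hp : (pn : Int) = pos := Int.toNat_of_nonneg hpre
  set R := cs.drop pn with hR
  simp only [PySem.Chars.lstrip]
  have hsplit := congrArg List.length (List.takeWhile_append_dropWhile (p := PySem.Chars.isspace) (l := R))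
  rw [List.length_append] at hsplit
  rw [rntA_skip_eq, ← hR]
  by_cases hstr : R.dropWhile PySem.Chars.isspace = []
  · -- no token: everything after pos is whitespace (or pos past the end)
    have hT : (R.takeWhile PySem.Chars.isspace).length = R.length := by
      rw [hstr] at hsplit; simpa using hsplit
    have hlenR : R.length = cs.length - pn := by simp [hR]
    have hge : cs.length ≤ pn + (R.takeWhile PySem.Chars.isspace).length := by omega
    rw [if_pos hge, hstr]
    simp only [List.isEmpty_nil, if_true, Prod.mk.injEq, List.length_nil]
    refine ⟨by trivial, ?_⟩
    push_cast
    omega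
  · -- token present
    have hTlt : (R.takeWhile PySem.Chars.isspace).length < R.length := by
      have : 0 < (R.dropWhile PySem.Chars.isspace).length := List.length_pos_of_ne_nil hstr
      omega
    have hlenR : R.length = cs.length - pn := by simp [hR]
    have hpnlt : pn < cs.length := by omega
    set T := (R.takeWhile PySem.Chars.isspace).length with hT
    have hlt : ¬ cs.length ≤ pn + T := by omega
    rw [if_neg hlt]
    have hdropP : cs.drop (pn + T) = R.dropWhile PySem.Chars.isspace := by
      rw [← drop_length_takeWhile' PySem.Chars.isspace R, hR, List.drop_drop, ← hT]
    set S := R.dropWhile PySem.Chars.isspace with hS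
    rw [rntA_scan_eq, hdropP]
    set U := (S.takeWhile (fun c => !PySem.Chars.isspace c)).length with hU
    rw [PySem.List.slice_toNat]
    simp only [Int.toNat_natCast, Nat.add_sub_cancel_left, hdropP]
    have htok : S.take U = S.takeWhile (fun c => !PySem.Chars.isspace c) := by
      rw [hU, take_length_takeWhile']
    have hfix : S.dropWhile PySem.Chars.isspace = S := by
      rw [List.dropWhile_eq_self_iff]
      intro hl
      simp only [List.getElem_zero, hS]
      simp [List.head_dropWhile_not]
    have hne : S.isEmpty = false := by simpa [List.isEmpty_iff] using hstr
    simp only [hne, Bool.false_eq_true, if_false]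
    rw [htok, split₀Max_one_head S hstr hfix]
    simp only [Prod.mk.injEq]
    refine ⟨by trivial, ?_⟩
    rw [← hU]
    push_cast
    omega
    all_goals positivity
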